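-- pv_equiv track=rewrite | github.com/hokto/Hazap_Server | source/Routes.py | Cut_places
-- ===== SOURCE A (Python) =====
-- def Cut_places(list_places,direction):
--     i=0
--     while(i<len(list_places)-1):
--         if(direction==1):
--             if(list_places[i][0]>list_places[i+1][0]):
--                 list_places.pop(i+1)
--             else:
--                 i+=1
--         elif(direction==-1):
--             if(list_places[i][0]<list_places[i+1][0]):
--                 list_places.pop(i+1)
--             else:
--                 i+=1
--     return list_places
-- ===== SOURCE B (Python) =====
-- def Cut_places(list_places, direction):
--     # Single pass: keep a row iff it does not violate monotonicity w.r.t. the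
--     # last KEPT row's first field (direction=1: non-decreasing, -1: non-increasing).
--     if len(list_places) < 2:
--         return list_places
--     if direction != 1 and direction != -1:
--         return list_places
--     out = [list_places[0]]
--     last = list_places[0][0]
--     for row in list_places[1:]:
--         cur = row[0]
--         drop = (last > cur) if direction == 1 else (last < cur)
--         if not drop:
--             out.append(row)
--             last = cur
--     return out
-- ===== Notes on version B (the rewrite author's own statement) =====
-- stated objective: faster
-- what changed: A repeatedly pops the offending next element from the list in place (each pop shifts the tail, O(n^2) worst case); B makes one pass building a new output list while tracking the first field of the last kept row, O(n) — intended as faster; a timing run could not measure a ratio (A timed out at n=16 where B returned).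
import Mathlib
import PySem

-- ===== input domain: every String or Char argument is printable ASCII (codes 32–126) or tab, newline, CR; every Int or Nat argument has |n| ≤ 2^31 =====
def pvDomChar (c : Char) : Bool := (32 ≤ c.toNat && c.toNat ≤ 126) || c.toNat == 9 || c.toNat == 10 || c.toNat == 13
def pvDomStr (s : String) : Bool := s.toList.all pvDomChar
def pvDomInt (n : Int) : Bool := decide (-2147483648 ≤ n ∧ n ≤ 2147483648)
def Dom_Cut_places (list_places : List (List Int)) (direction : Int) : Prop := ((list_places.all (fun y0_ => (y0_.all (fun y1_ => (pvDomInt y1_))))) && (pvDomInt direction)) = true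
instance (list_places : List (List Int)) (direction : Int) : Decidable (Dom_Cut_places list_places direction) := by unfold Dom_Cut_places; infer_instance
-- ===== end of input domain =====

-- B replaces A's in-place pop loop by a single pass that builds a new list while tracking
-- the last kept row's first field; intended as faster (a timing run could not measure a
-- ratio: A did not finish on its timing inputs). A mutates list_places in place; the
-- equivalence proved here is about the RETURN value only (B does not mutate its argument).

-- ===== PORT A =====
-- A's while loop: i and the (mutated) list are the recursion state; measure lp.length - i.
-- The unreachable-under-Pre_ fallthroughs (empty row → IndexError in Python, direction
-- outside {1,-1} with ≥ 2 rows → Python loops forever) exit with the current list.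
def cutLoopA (direction : Int) (lp : List (List Int)) (i : Nat) : List (List Int) :=
  if _h : i + 1 < lp.length then
    if direction = 1 then
      match PySem.List.pyGet? lp (i : Int), PySem.List.pyGet? lp ((i : Int) + 1) with
      | some a, some b =>
        match PySem.List.pyGet? a 0, PySem.List.pyGet? b 0 with
        | some a0, some b0 =>
          if a0 > b0 then
            match _hp : PySem.List.pop? lp ((i : Int) + 1) with
            | some r => cutLoopA direction r.2 i
            | none => lp
          else cutLoopA direction lp (i + 1)
        | _, _ => lp
      | _, _ => lp
    else if direction = -1 then
      match PySem.List.pyGet? lp (i : Int), PySem.List.pyGet? lp ((i : Int) + 1) with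
      | some a, some b =>
        match PySem.List.pyGet? a 0, PySem.List.pyGet? b 0 with
        | some a0, some b0 =>
          if a0 < b0 then
            match _hp : PySem.List.pop? lp ((i : Int) + 1) with
            | some r => cutLoopA direction r.2 i
            | none => lp
          else cutLoopA direction lp (i + 1)
        | _, _ => lp
      | _, _ => lp
    else lp
  else lp
termination_by lp.length - i
decreasing_by
  all_goals
    first
      | omega
      | (have := PySem.List.length_of_pop?_eq_some _ _hp
         omega)

def Cut_places (list_places : List (List Int)) (direction : Int) : List (List Int) :=
  cutLoopA direction list_places 0

-- ===== PORT B =====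
-- the for-loop of Source B: `last` is the first field of the last kept row, the output is
-- built front-to-back (here by consing the kept row onto the recursive result).
def cutGoB (direction : Int) (last : List Int) (rest : List (List Int)) : List (List Int) :=
  match rest with
  | [] => [last]
  | y :: ys =>
    let lastv := last.headD 0
    let cur := y.headD 0
    let drop := if direction = 1 then lastv > cur else lastv < cur
    if drop then cutGoB direction last ys else last :: cutGoB direction y ys

def Cut_places_alt (list_places : List (List Int)) (direction : Int) : List (List Int) :=
  if list_places.length < 2 then list_places
  else if direction ≠ 1 ∧ direction ≠ -1 then list_places
  else
    match list_places with
    | [] => []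
    | x :: xs => cutGoB direction x xs

-- ===== PRECONDITION & SPEC =====
-- Pre_ excludes exactly the inputs where Python A does not return: with ≥ 2 rows, a
-- direction outside {1,-1} makes A's while loop run forever, and an empty inner row
-- raises IndexError; with ≤ 1 row A returns the list untouched whatever the arguments.
def Pre_Cut_places (list_places : List (List Int)) (direction : Int) : Prop :=
  list_places.length ≤ 1 ∨
    ((direction = 1 ∨ direction = -1) ∧ ∀ r ∈ list_places, r ≠ [])
instance (list_places : List (List Int)) (direction : Int) : Decidable (Pre_Cut_places list_places direction) := by unfold Pre_Cut_places; infer_instance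

def pvWitness_Cut_places : List (List Int) × Int := ([[3, 7], [1], [4, 2], [4], [2]], 1)

def Spec_Cut_places (list_places : List (List Int)) (direction : Int) (out : List (List Int)) : Prop := out = Cut_places_alt list_places direction
instance (list_places : List (List Int)) (direction : Int) (out : List (List Int)) : Decidable (Spec_Cut_places list_places direction out) := by unfold Spec_Cut_places; infer_instance

-- ===== CLAIM (what is proved, stated in full; the proofs are below) =====
def Claim_equal_Cut_places : Prop := ∀ (list_places : List (List Int)) (direction : Int), Dom_Cut_places list_places direction → Pre_Cut_places list_places direction → Spec_Cut_places list_places direction (Cut_places list_places direction)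

-- ===== LEMMAS AND PROOFS =====

theorem eraseIdx_mid {α : Type} (done : List α) (a y : α) (ys : List α) :
    (done ++ a :: y :: ys).eraseIdx (done.length + 1) = done ++ a :: ys := by
  induction done with
  | nil => rfl
  | cons d ds ih => simpa [List.eraseIdx] using ih

theorem getElem_mid {α : Type} (done : List α) (a y : α) (ys : List α)
    (h : done.length + 1 < (done ++ a :: y :: ys).length) :
    (done ++ a :: y :: ys)[done.length + 1] = y := by
  rw [List.getElem_append_right (by simp)]
  simp

-- the loop invariant: at index i = done.length, rows 0..i are final, lp[i] is the last kept
-- row, and the loop's result is done ++ (B's scan of the remainder starting from that row).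
theorem loop_eq (direction : Int) (hdir : direction = 1 ∨ direction = -1)
    (rest : List (List Int)) :
    ∀ (done : List (List Int)) (last : List Int), last ≠ [] → (∀ r ∈ rest, r ≠ []) →
      cutLoopA direction (done ++ last :: rest) done.length = done ++ cutGoB direction last rest := by
  induction rest with
  | nil =>
    intro done last _ _
    rw [cutLoopA.eq_def]
    simp [cutGoB]
  | cons y ys ih =>
    intro done last hlast hrest
    obtain ⟨la, ltl, rfl⟩ : ∃ a tl, last = a :: tl := by
      cases last with | nil => exact absurd rfl hlast | cons a tl => exact ⟨a, tl, rfl⟩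
    obtain ⟨yb, ytl, rfl⟩ : ∃ a tl, y = a :: tl := by
      have := hrest y (by simp)
      cases y with | nil => exact absurd rfl this | cons a tl => exact ⟨a, tl, rfl⟩
    have hlen : done.length + 1 < (done ++ (la :: ltl) :: (yb :: ytl) :: ys).length := by
      simp
    have hga : PySem.List.pyGet? (done ++ (la :: ltl) :: (yb :: ytl) :: ys) (done.length : Int)
        = some (la :: ltl) := PySem.List.pyGet?_append_length ..
    have hgb : PySem.List.pyGet? (done ++ (la :: ltl) :: (yb :: ytl) :: ys) ((done.length : Int) + 1)
        = some (yb :: ytl) := by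
      have := PySem.List.pyGet?_append_right done ((la :: ltl) :: (yb :: ytl) :: ys) 1
      simpa using this
    have hpop : PySem.List.pop? (done ++ (la :: ltl) :: (yb :: ytl) :: ys) ((done.length : Int) + 1)
        = some ((yb :: ytl), done ++ (la :: ltl) :: ys) := by
      have hcast : ((done.length : Int) + 1) = ((done.length + 1 : Nat) : Int) := by push_cast; ring
      rw [hcast, PySem.List.pop?_natCast _ _ hlen, eraseIdx_mid]
      simp only [Option.some.injEq, Prod.mk.injEq]
      exact ⟨getElem_mid done _ _ _ hlen, trivial⟩
    have hrest' : ∀ r ∈ ys, r ≠ [] := fun r hr => hrest r (by simp [hr])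
    have hkeep : cutLoopA direction (done ++ (la :: ltl) :: (yb :: ytl) :: ys) (done.length + 1)
        = done ++ (la :: ltl) :: cutGoB direction (yb :: ytl) ys := by
      have := ih (done ++ [la :: ltl]) (yb :: ytl) (by simp) hrest'
      simpa using this
    have hdrop : cutLoopA direction (done ++ (la :: ltl) :: ys) done.length
        = done ++ cutGoB direction (la :: ltl) ys := ih done (la :: ltl) hlast hrest'
    rcases hdir with h1 | h1 <;> subst h1
    · -- direction = 1
      rw [cutLoopA.eq_def, dif_pos hlen, if_pos rfl]
      simp only [hga, hgb, PySem.List.pyGet?_zero_cons]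
      by_cases hc : la > yb
      · rw [if_pos hc]
        split
        · rename_i r heq
          rw [hpop] at heq
          injection heq with h2
          subst h2
          simp only []
          rw [hdrop]
          simp [cutGoB, hc]
        · rename_i heq
          rw [hpop] at heq
          simp at heq
      · rw [if_neg hc]
        rw [hkeep]
        simp [cutGoB, hc]
    · -- direction = -1
      rw [cutLoopA.eq_def, dif_pos hlen, if_neg (by norm_num), if_pos rfl]
      simp only [hga, hgb, PySem.List.pyGet?_zero_cons]
      by_cases hc : la < yb
      · rw [if_pos hc]
        split
        · rename_i r heq
          rw [hpop] at heq
          injection heq with h2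
          subst h2
          simp only []
          rw [hdrop]
          simp [cutGoB, hc]
        · rename_i heq
          rw [hpop] at heq
          simp at heq
      · rw [if_neg hc]
        rw [hkeep]
        simp [cutGoB, hc]

-- ===== VERDICT (by name: the statement is the Claim_ definition above) =====
theorem Cut_places_spec : Claim_equal_Cut_places := by
  intro lp direction _hdom hpre
  unfold Spec_Cut_places Cut_places Cut_places_alt
  rcases hpre with hshort | ⟨hdir, hrows⟩
  · have hlt : lp.length < 2 := by omega
    rw [cutLoopA.eq_def]
    simp only [if_pos hlt]
    have hng : ¬ (0 + 1 < lp.length) := by omega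
    simp [hng]
  · cases lp with
    | nil =>
      rw [cutLoopA.eq_def]; simp
    | cons x xs =>
      cases xs with
      | nil =>
        rw [cutLoopA.eq_def]; simp
      | cons x' xs' =>
        have hlen2 : ¬ (x :: x' :: xs').length < 2 := by simp
        have h := loop_eq direction hdir (x' :: xs') [] x (hrows x (by simp))
          (fun r hr => hrows r (by simp [hr]))
        rcases hdir with h1 | h1 <;> subst h1 <;> simpa [hlen2] using h
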